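-- pv_equiv track=rewrite | github.com/nsandor/ReadoubtSW | ReadoubtSW.py | _parse_pixel_spec
-- ===== SOURCE A (Python) =====
-- from typing import Iterable, List, Optional
--
-- def _parse_pixel_spec(spec: str) -> List[int]:
--     indices: set[int] = set()
--     s = (spec or "").replace(" ", "").strip()
--     if not s:
--         return list(range(1, 101))
--     for tok in s.split(","):
--         if not tok:
--             continue
--         if "-" in tok:
--             a_str, b_str = tok.split("-", 1)
--             a, b = int(a_str), int(b_str)
--             step = 1 if b >= a else -1
--             for k in range(a, b + step, step):
--                 if 1 <= k <= 100:
--                     indices.add(k)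
--         else:
--             k = int(tok)
--             if 1 <= k <= 100:
--                 indices.add(k)
--     if not indices:
--         raise ValueError("No valid pixel indices in selection")
--     return sorted(indices)
-- ===== SOURCE B (Python) =====
-- from typing import List
--
-- def _parse_pixel_spec(spec: str) -> List[int]:
--     # Interval-merge algorithm: each token becomes one clamped interval (O(1) per
--     # token, no per-element work); sort intervals by start and sweep once,
--     # emitting the union in increasing order without ever building a set.
--     s = (spec or "").replace(" ", "").strip()
--     if not s:
--         return list(range(1, 101))
--     intervals = []
--     for tok in s.split(","):
--         if not tok:
--             continue
--         if "-" in tok: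
--             a_str, b_str = tok.split("-", 1)
--             a, b = int(a_str), int(b_str)
--             lo, hi = (a, b) if a <= b else (b, a)
--         else:
--             lo = hi = int(tok)
--         lo, hi = max(lo, 1), min(hi, 100)
--         if lo <= hi:
--             intervals.append((lo, hi))
--     if not intervals:
--         raise ValueError("No valid pixel indices in selection")
--     intervals.sort(key=lambda t: t[0])
--     result: List[int] = []
--     cur = 0  # largest index already emitted
--     for lo, hi in intervals:
--         result.extend(range(max(lo, cur + 1), hi + 1))
--         if hi > cur:
--             cur = hi
--     return result
-- ===== Notes on version B (the rewrite author's own statement) =====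
-- stated objective: alternative
-- what changed: B replaces A's element-wise set accumulation plus final sorted() by interval merging: each token is reduced in O(1) to one clamped interval, the intervals are sorted by start and a single sweep emits their union in increasing order, so no per-element marking and no sort of indices.
import Mathlib
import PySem

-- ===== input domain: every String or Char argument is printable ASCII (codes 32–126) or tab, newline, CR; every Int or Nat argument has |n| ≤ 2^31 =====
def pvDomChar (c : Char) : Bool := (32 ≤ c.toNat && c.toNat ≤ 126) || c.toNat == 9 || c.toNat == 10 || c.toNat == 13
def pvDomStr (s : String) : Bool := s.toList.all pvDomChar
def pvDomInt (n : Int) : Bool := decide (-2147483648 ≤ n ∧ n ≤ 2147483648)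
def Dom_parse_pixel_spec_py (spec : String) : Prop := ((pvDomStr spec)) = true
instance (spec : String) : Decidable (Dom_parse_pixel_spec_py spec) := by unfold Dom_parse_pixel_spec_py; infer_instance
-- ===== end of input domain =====

-- B replaces A's element-wise set accumulation + final sort by interval merging: each token becomes
-- one clamped interval, intervals are sorted by start and a single sweep emits the union in order;
-- equal return values on Pre_ (exactly where A returns).

-- ===== PORT A =====
-- one token of A's loop: returns none exactly where int() raises ValueError
def pvAstep (st : PySem.Set Int) (tok : List Char) : Option (PySem.Set Int) :=
  if tok = [] then some st
  else if PySem.Chars.isIn ['-'] tok then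
    match PySem.Chars.splitOnMax tok ['-'] 1 with
    | [aS, bS] =>
      match PySem.Int.ofChars? aS, PySem.Int.ofChars? bS with
      | some a, some b =>
        let step : Int := if a ≤ b then 1 else -1
        some ((PySem.List.pyRange a (b + step) step).foldl
          (fun s k => if 1 ≤ k ∧ k ≤ 100 then PySem.Set.add s k else s) st)
      | _, _ => none
    | _ => none
  else
    match PySem.Int.ofChars? tok with
    | some k => some (if 1 ≤ k ∧ k ≤ 100 then PySem.Set.add st k else st)
    | none => none

def parse_pixel_spec_py (spec : String) : List Int :=
  let s := PySem.Chars.strip (PySem.Chars.replace spec.toList [' '] [])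
  if s = [] then PySem.List.pyRange 1 101 1
  else
    match (PySem.Chars.splitOn s [',']).foldl
        (fun acc tok => acc.bind (fun st => pvAstep st tok)) (some PySem.Set.empty) with
    | none => []          -- a token on which int() raises ValueError: outside Pre_
    | some st =>
      if st = [] then []  -- "No valid pixel indices in selection" ValueError: outside Pre_
      else PySem.List.sorted st (fun x => x) false

-- ===== PORT B =====
-- one token of B's loop: appends the token's clamped interval (if nonempty) to the interval list
def pvBtok (iv : List (Int × Int)) (tok : List Char) : Option (List (Int × Int)) :=
  if tok = [] then some iv
  else if PySem.Chars.isIn ['-'] tok then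
    match PySem.Chars.splitOnMax tok ['-'] 1 with
    | [aS, bS] =>
      match PySem.Int.ofChars? aS, PySem.Int.ofChars? bS with
      | some a, some b =>
        let lo : Int := if a ≤ b then a else b
        let hi : Int := if a ≤ b then b else a
        some (if max lo 1 ≤ min hi 100 then iv ++ [(max lo 1, min hi 100)] else iv)
      | _, _ => none
    | _ => none
  else
    match PySem.Int.ofChars? tok with
    | some k => some (if max k 1 ≤ min k 100 then iv ++ [(max k 1, min k 100)] else iv)
    | none => none

-- B's merge sweep over the start-sorted intervals: cur = largest index already emitted
def pvSweep : List (Int × Int) → Int → List Int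
  | [], _ => []
  | (lo, hi) :: rest, cur =>
      PySem.List.pyRange (max lo (cur + 1)) (hi + 1) 1 ++
        pvSweep rest (if cur < hi then hi else cur)

def parse_pixel_spec_py_alt (spec : String) : List Int :=
  let s := PySem.Chars.strip (PySem.Chars.replace spec.toList [' '] [])
  if s = [] then PySem.List.pyRange 1 101 1
  else
    match (PySem.Chars.splitOn s [',']).foldl
        (fun acc tok => acc.bind (fun iv => pvBtok iv tok)) (some ([] : List (Int × Int))) with
    | none => []          -- ValueError from int(): outside Pre_
    | some iv =>
      if iv = [] then []  -- "No valid pixel indices in selection" ValueError: outside Pre_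
      else pvSweep (PySem.List.sorted iv (fun p => p.1) false) 0

-- ===== PRECONDITION & SPEC =====
-- token shape: int() succeeds on every part (no ValueError)
def pvTokOK (tok : List Char) : Bool :=
  tok = [] ||
  (if PySem.Chars.isIn ['-'] tok then
     match PySem.Chars.splitOnMax tok ['-'] 1 with
     | [aS, bS] => (PySem.Int.ofChars? aS).isSome && (PySem.Int.ofChars? bS).isSome
     | _ => false
   else (PySem.Int.ofChars? tok).isSome)

-- token contributes at least one index in 1..100
def pvTokHit (tok : List Char) : Bool :=
  !(tok = [] : Bool) &&
  (if PySem.Chars.isIn ['-'] tok then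
     match PySem.Chars.splitOnMax tok ['-'] 1 with
     | [aS, bS] =>
       match PySem.Int.ofChars? aS, PySem.Int.ofChars? bS with
       | some a, some b => decide (min a b ≤ 100 ∧ 1 ≤ max a b)
       | _, _ => false
     | _ => false
   else
     match PySem.Int.ofChars? tok with
     | some k => decide (1 ≤ k ∧ k ≤ 100)
     | none => false)

-- Pre_ excludes exactly the inputs where A raises ValueError: a token int() cannot parse,
-- or a nonempty spec selecting no index in 1..100.
def Pre_parse_pixel_spec_py (spec : String) : Prop :=
  let s := PySem.Chars.strip (PySem.Chars.replace spec.toList [' '] [])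
  s = [] ∨ ((PySem.Chars.splitOn s [',']).all pvTokOK = true ∧
            (PySem.Chars.splitOn s [',']).any pvTokHit = true)
instance (spec : String) : Decidable (Pre_parse_pixel_spec_py spec) := by
  unfold Pre_parse_pixel_spec_py; infer_instance

def pvWitness_parse_pixel_spec_py : String := "3, 8-6,200"

def Spec_parse_pixel_spec_py (spec : String) (out : List Int) : Prop := out = parse_pixel_spec_py_alt spec
instance (spec : String) (out : List Int) : Decidable (Spec_parse_pixel_spec_py spec out) := by
  unfold Spec_parse_pixel_spec_py; infer_instance

-- ===== CLAIM (what is proved, stated in full; the proofs are below) =====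
def Claim_equal_parse_pixel_spec_py : Prop := ∀ (spec : String), Dom_parse_pixel_spec_py spec → Pre_parse_pixel_spec_py spec → Spec_parse_pixel_spec_py spec (parse_pixel_spec_py spec)

-- ===== LEMMAS AND PROOFS =====

-- membership in A's clamped-range accumulation
lemma pv_A_range_mem (a b : Int) (st : List Int) (x : Int) :
    (x ∈ (PySem.List.pyRange a (b + (if a ≤ b then (1:Int) else -1)) (if a ≤ b then (1:Int) else -1)).foldl
        (fun s k => if 1 ≤ k ∧ k ≤ 100 then PySem.Set.add s k else s) st)
      ↔ (x ∈ st ∨ (1 ≤ x ∧ x ≤ 100 ∧ min a b ≤ x ∧ x ≤ max a b)) := by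
  rw [PySem.List.foldl_ite_eq_foldl_filter (fun k => 1 ≤ k ∧ k ≤ 100) (fun s k => PySem.Set.add s k)]
  rw [show ∀ (l : List Int), l.foldl (fun s k => PySem.Set.add s k) st = PySem.Set.update st l
        from fun l => rfl]
  rw [PySem.Set.mem_update]
  refine or_congr Iff.rfl ?_
  by_cases hab : a ≤ b
  · simp [hab, List.mem_filter, PySem.List.mem_pyRange_one]
    omega
  · simp [hab, List.mem_filter, PySem.List.mem_pyRange_neg_one]
    omega

lemma pv_A_range_nodup (a b : Int) (st : List Int) (hnd : st.Nodup) :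
    ((PySem.List.pyRange a (b + (if a ≤ b then (1:Int) else -1)) (if a ≤ b then (1:Int) else -1)).foldl
        (fun s k => if 1 ≤ k ∧ k ≤ 100 then PySem.Set.add s k else s) st).Nodup := by
  rw [PySem.List.foldl_ite_eq_foldl_filter (fun k => 1 ≤ k ∧ k ≤ 100) (fun s k => PySem.Set.add s k)]
  rw [show ∀ (l : List Int), l.foldl (fun s k => PySem.Set.add s k) st = PySem.Set.update st l
        from fun l => rfl]
  exact PySem.Set.nodup_update _ _ hnd

-- one token preserves the A-set / B-interval-list relation
lemma pv_step (tok : List Char) (st : List Int) (iv : List (Int × Int))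
    (hok : pvTokOK tok = true) (hnd : st.Nodup)
    (hb : ∀ p ∈ iv, 1 ≤ p.1 ∧ p.1 ≤ p.2 ∧ p.2 ≤ 100)
    (hrel : ∀ x : Int, x ∈ st ↔ ∃ p ∈ iv, p.1 ≤ x ∧ x ≤ p.2) :
    ∃ st1 iv1, pvAstep st tok = some st1 ∧ pvBtok iv tok = some iv1 ∧
      st1.Nodup ∧ (∀ p ∈ iv1, 1 ≤ p.1 ∧ p.1 ≤ p.2 ∧ p.2 ≤ 100) ∧
      (∀ x : Int, x ∈ st1 ↔ ∃ p ∈ iv1, p.1 ≤ x ∧ x ≤ p.2) := by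
  by_cases h0 : tok = []
  · exact ⟨st, iv, by simp [pvAstep, h0], by simp [pvBtok, h0], hnd, hb, hrel⟩
  by_cases h1 : PySem.Chars.isIn ['-'] tok = true
  · -- range token
    rcases hsp : PySem.Chars.splitOnMax tok ['-'] 1 with _ | ⟨aS, _ | ⟨bS, _ | ⟨cS, rest⟩⟩⟩
    · simp [pvTokOK, h0, h1, hsp] at hok
    · simp [pvTokOK, h0, h1, hsp] at hok
    · rcases ha : PySem.Int.ofChars? aS with _ | a
      · simp [pvTokOK, h0, h1, hsp, ha] at hok
      rcases hbint : PySem.Int.ofChars? bS with _ | b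
      · simp [pvTokOK, h0, h1, hsp, ha, hbint] at hok
      have hA : pvAstep st tok = some ((PySem.List.pyRange a (b + (if a ≤ b then (1:Int) else -1)) (if a ≤ b then (1:Int) else -1)).foldl
          (fun s k => if 1 ≤ k ∧ k ≤ 100 then PySem.Set.add s k else s) st) := by
        simp only [pvAstep, if_neg h0, if_pos h1, hsp, ha, hbint]
      have e1 : (if a ≤ b then a else b) = min a b := by split <;> omega
      have e2 : (if a ≤ b then b else a) = max a b := by split <;> omega
      have hB : pvBtok iv tok = some (if max (min a b) 1 ≤ min (max a b) 100 then iv ++ [(max (min a b) 1, min (max a b) 100)] else iv) := by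
        simp only [pvBtok, if_neg h0, if_pos h1, hsp, ha, hbint, e1, e2]
      refine ⟨_, _, hA, hB, pv_A_range_nodup a b st hnd, ?_, ?_⟩
      · intro p hp
        split at hp
        · rcases List.mem_append.mp hp with h | h
          · exact hb p h
          · simp at h; subst h; refine ⟨by omega, by omega, by omega⟩
        · exact hb p hp
      · intro x
        rw [pv_A_range_mem, hrel x]
        by_cases hcl : max (min a b) 1 ≤ min (max a b) 100
        · simp only [if_pos hcl]
          constructor
          · rintro (⟨p, hp, hx⟩ | hx)
            · exact ⟨p, List.mem_append.mpr (Or.inl hp), hx⟩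
            · refine ⟨(max (min a b) 1, min (max a b) 100), List.mem_append.mpr (Or.inr (by simp)), ?_, ?_⟩ <;> simp <;> omega
          · rintro ⟨p, hp, hx⟩
            rcases List.mem_append.mp hp with h | h
            · exact Or.inl ⟨p, h, hx⟩
            · simp at h; subst h; right; simp at hx; omega
        · simp only [if_neg hcl]
          constructor
          · rintro (⟨p, hp, hx⟩ | hx)
            · exact ⟨p, hp, hx⟩
            · omega
          · rintro ⟨p, hp, hx⟩; exact Or.inl ⟨p, hp, hx⟩
    · simp [pvTokOK, h0, h1, hsp] at hok
  · -- single-int token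
    rcases hk : PySem.Int.ofChars? tok with _ | k
    · simp [pvTokOK, h0, h1, hk] at hok
    have hA : pvAstep st tok = some (if 1 ≤ k ∧ k ≤ 100 then PySem.Set.add st k else st) := by
      simp only [pvAstep, if_neg h0, if_neg h1, hk]
    have hB : pvBtok iv tok = some (if max k 1 ≤ min k 100 then iv ++ [(max k 1, min k 100)] else iv) := by
      simp only [pvBtok, if_neg h0, if_neg h1, hk]
    by_cases hkr : 1 ≤ k ∧ k ≤ 100
    · have hcl : max k 1 ≤ min k 100 := by omega
      have e1 : max k 1 = k := by omega
      have e2 : min k 100 = k := by omega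
      refine ⟨_, _, hA, hB, ?_, ?_, ?_⟩
      · rw [if_pos hkr]; exact PySem.Set.nodup_add st k hnd
      · rw [if_pos hcl, e1, e2]
        intro p hp
        rcases List.mem_append.mp hp with h | h
        · exact hb p h
        · simp at h; subst h; exact ⟨hkr.1, le_refl _, hkr.2⟩
      · intro x
        rw [if_pos hkr, if_pos hcl, e1, e2, PySem.Set.mem_add, hrel x]
        constructor
        · rintro (⟨p, hp, hx⟩ | hx)
          · exact ⟨p, List.mem_append.mpr (Or.inl hp), hx⟩
          · exact ⟨(k, k), List.mem_append.mpr (Or.inr (by simp)), by simp [hx]⟩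
        · rintro ⟨p, hp, hx⟩
          rcases List.mem_append.mp hp with h | h
          · exact Or.inl ⟨p, h, hx⟩
          · simp at h; subst h; right; simp at hx; omega
    · have hcl : ¬ (max k 1 ≤ min k 100) := by omega
      refine ⟨_, _, hA, hB, ?_, ?_, ?_⟩
      · rw [if_neg hkr]; exact hnd
      · rw [if_neg hcl]; exact hb
      · intro x; rw [if_neg hkr, if_neg hcl]; exact hrel x

-- the whole token fold preserves the relation
lemma pv_fold (toks : List (List Char)) : ∀ (st : List Int) (iv : List (Int × Int)),
    (∀ t ∈ toks, pvTokOK t = true) → st.Nodup →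
    (∀ p ∈ iv, 1 ≤ p.1 ∧ p.1 ≤ p.2 ∧ p.2 ≤ 100) →
    (∀ x : Int, x ∈ st ↔ ∃ p ∈ iv, p.1 ≤ x ∧ x ≤ p.2) →
    ∃ st' iv',
      toks.foldl (fun acc tok => acc.bind (fun s => pvAstep s tok)) (some st) = some st' ∧
      toks.foldl (fun acc tok => acc.bind (fun l => pvBtok l tok)) (some iv) = some iv' ∧
      st'.Nodup ∧ (∀ p ∈ iv', 1 ≤ p.1 ∧ p.1 ≤ p.2 ∧ p.2 ≤ 100) ∧
      (∀ x : Int, x ∈ st' ↔ ∃ p ∈ iv', p.1 ≤ x ∧ x ≤ p.2) := by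
  induction toks with
  | nil =>
    intro st iv _ hnd hb hrel
    exact ⟨st, iv, rfl, rfl, hnd, hb, hrel⟩
  | cons t toks ih =>
    intro st iv hok hnd hb hrel
    obtain ⟨st1, iv1, hA1, hB1, hnd1, hb1, hrel1⟩ :=
      pv_step t st iv (hok t (by simp)) hnd hb hrel
    obtain ⟨st', iv', hA, hB, h3, h4, h5⟩ :=
      ih st1 iv1 (fun u hu => hok u (by simp [hu])) hnd1 hb1 hrel1
    exact ⟨st', iv', by simpa [hA1] using hA, by simpa [hB1] using hB, h3, h4, h5⟩

-- the sweep over start-sorted intervals is strictly increasing and enumerates the union above cur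
lemma pv_sweep (iv : List (Int × Int)) : ∀ (cur : Int),
    iv.Pairwise (fun p q => p.1 ≤ q.1) →
    (pvSweep iv cur).Pairwise (· < ·) ∧
    (∀ x : Int, x ∈ pvSweep iv cur ↔ (cur < x ∧ ∃ p ∈ iv, p.1 ≤ x ∧ x ≤ p.2)) := by
  induction iv with
  | nil => intro cur _; simp [pvSweep]
  | cons p rest ih =>
    intro cur hpw
    obtain ⟨lo, hi⟩ := p
    have h1 : ∀ q ∈ rest, lo ≤ q.1 := by
      intro q hq; exact List.rel_of_pairwise_cons hpw hq
    have ihh := ih (if cur < hi then hi else cur) (List.Pairwise.sublist (List.sublist_cons_self _ _) hpw)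
    constructor
    · rw [pvSweep, List.pairwise_append]
      refine ⟨PySem.List.pairwise_lt_pyRange_one _ _, ihh.1, ?_⟩
      intro a haa b hbb
      rw [PySem.List.mem_pyRange_one] at haa
      have := (ihh.2 b).mp hbb
      have : (if cur < hi then hi else cur) < b := this.1
      split at this <;> omega
    · intro x
      rw [pvSweep, List.mem_append, PySem.List.mem_pyRange_one, ihh.2 x]
      constructor
      · rintro (hx | ⟨hcx, q, hq, hxq⟩)
        · refine ⟨by omega, (lo, hi), by simp, by simp; omega⟩
        · refine ⟨by split at hcx <;> omega, q, by simp [hq], hxq⟩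
      · rintro ⟨hcx, q, hq, hxq⟩
        rcases List.mem_cons.mp hq with h | h
        · subst h; simp at hxq; left; omega
        · by_cases hgt : (if cur < hi then hi else cur) < x
          · exact Or.inr ⟨hgt, q, h, hxq⟩
          · left
            have hloq := h1 q h
            split at hgt <;> omega

-- ===== VERDICT (by name: the statement is the Claim_ definition above) =====
theorem parse_pixel_spec_py_spec : Claim_equal_parse_pixel_spec_py := by
  unfold Claim_equal_parse_pixel_spec_py Spec_parse_pixel_spec_py
  intro spec _ hpre
  unfold Pre_parse_pixel_spec_py at hpre
  by_cases hs : PySem.Chars.strip (PySem.Chars.replace spec.toList [' '] []) = []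
  · simp [parse_pixel_spec_py, parse_pixel_spec_py_alt, hs]
  · simp only [hs, false_or] at hpre
    obtain ⟨hall, -⟩ := hpre
    obtain ⟨st', iv', hA, hB, hnd, hb, hrel⟩ :=
      pv_fold (PySem.Chars.splitOn (PySem.Chars.strip (PySem.Chars.replace spec.toList [' '] [])) [','])
        [] [] (fun t ht => List.all_eq_true.mp hall t ht)
        List.nodup_nil (by simp) (by simp)
    simp only [parse_pixel_spec_py, parse_pixel_spec_py_alt, if_neg hs]
    rw [show (PySem.Set.empty : PySem.Set Int) = [] from rfl] at *
    rw [hA, hB]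
    simp only []
    have hiff : st' = [] ↔ iv' = [] := by
      constructor
      · intro h
        rcases iv' with _ | ⟨q, rest⟩
        · rfl
        · exfalso
          have hq1 : q.1 ∈ st' := (hrel q.1).mpr ⟨q, by simp, le_refl _, (hb q (by simp)).2.1⟩
          rw [h] at hq1; simp at hq1
      · intro h
        rw [List.eq_nil_iff_forall_not_mem]
        intro x hx
        obtain ⟨p, hp, -⟩ := (hrel x).mp hx
        rw [h] at hp; simp at hp
    by_cases hst : st' = []
    · rw [if_pos hst, if_pos (hiff.mp hst)]
    · rw [if_neg hst, if_neg (fun h => hst (hiff.mpr h))]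
      have hsw := pv_sweep (PySem.List.sorted iv' (fun p => p.1) false) 0
        (PySem.List.sorted_pairwise iv' (fun p => p.1))
      apply PySem.List.sorted_eq_of_perm_of_pairwise_lt
      · apply (List.perm_ext_iff_of_nodup (hsw.1.imp (fun h => ne_of_lt h)) hnd).mpr
        intro x
        rw [hsw.2 x, hrel x]
        constructor
        · rintro ⟨-, p, hp, hx⟩
          exact ⟨p, ((PySem.List.mem_sorted _ _ _ _).mp hp), hx⟩
        · rintro ⟨p, hp, hx⟩
          refine ⟨?_, p, ((PySem.List.mem_sorted _ _ _ _).mpr hp), hx⟩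
          have := (hb p hp).1
          omega
      · exact hsw.1
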